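-- pv_equiv track=rewrite | github.com/nanocurrency/nano-node | util/changelog.py | handle_labels
-- ===== SOURCE A (Python) =====
-- from typing import Tuple
--
-- SECTIONS = {
--     "Major Changes": [
--         "major",
--     ],
--     "Protocol Changes": [
--         "protocol change",
--     ],
--     "Node Configuration Updates": [
--         "toml",
--         "configuration default change",
--     ],
--     "RPC Updates": [
--         "rpc",
--     ],
--     "IPC Updates": [
--         "ipc",
--     ],
--     "Websocket Updates": [
--         "websockets",
--     ],
--     "CLI Updates": [
--         "cli",
--     ],
--     "Deprecation/Removal": [
--         "deprecation",
--         "removal",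
--     ],
--     "Developer Wallet": [
--         "qt wallet",
--     ],
--     "Ledger & Database": [
--         "database",
--         "database structure",
--     ],
--     "Developer/Debug Options": [
--         "debug",
--         "logging",
--     ],
--     "Fixed Bugs": [
--         "bug",
--     ],
--     "Implemented Enhancements": [
--         "enhancement",
--         "functionality quality improvements",
--         "performance",
--         "quality improvements",
--     ],
--     "Build, Test, Automation, Cleanup & Chores": [
--         "build-error",
--         "documentation",
--         "non-functional change",
--         "routine",
--         "sanitizers",
--         "static-analysis",
--         "tool",
--         "unit test",
--         "universe",
--     ],
--     "Other": []
-- }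
--
-- def handle_labels(labels) -> Tuple[str, bool]:
--     for section, values in SECTIONS.items():
--         for label in labels:
--             if label in values:
--                 if any(
--                         string in labels for string in [
--                             'breaking',
--                         ]):
--                     return section, True
--                 else:
--                     return section, False
--     return 'Other', False
-- ===== SOURCE B (Python) =====
-- from typing import Tuple
--
-- SECTIONS = {
--     "Major Changes": [
--         "major",
--     ],
--     "Protocol Changes": [
--         "protocol change",
--     ],
--     "Node Configuration Updates": [
--         "toml",
--         "configuration default change",
--     ],
--     "RPC Updates": [
--         "rpc",
--     ],
--     "IPC Updates": [
--         "ipc",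
--     ],
--     "Websocket Updates": [
--         "websockets",
--     ],
--     "CLI Updates": [
--         "cli",
--     ],
--     "Deprecation/Removal": [
--         "deprecation",
--         "removal",
--     ],
--     "Developer Wallet": [
--         "qt wallet",
--     ],
--     "Ledger & Database": [
--         "database",
--         "database structure",
--     ],
--     "Developer/Debug Options": [
--         "debug",
--         "logging",
--     ],
--     "Fixed Bugs": [
--         "bug",
--     ],
--     "Implemented Enhancements": [
--         "enhancement",
--         "functionality quality improvements",
--         "performance",
--         "quality improvements",
--     ],
--     "Build, Test, Automation, Cleanup & Chores": [
--         "build-error",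
--         "documentation",
--         "non-functional change",
--         "routine",
--         "sanitizers",
--         "static-analysis",
--         "tool",
--         "unit test",
--         "universe",
--     ],
--     "Other": []
-- }
--
-- # Reverse index: label -> (section priority, section name); each label occurs in exactly one section.
-- LABEL_TO_SECTION = {
--     label: (i, section)
--     for i, (section, section_labels) in enumerate(SECTIONS.items())
--     for label in section_labels
-- }
--
-- def handle_labels(labels) -> Tuple[str, bool]:
--     best = None
--     for label in labels:
--         hit = LABEL_TO_SECTION.get(label)
--         if hit is not None and (best is None or hit[0] < best[0]):
--             best = hit
--     if best is None:
--         return 'Other', False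
--     return best[1], 'breaking' in labels
-- ===== Notes on version B (the rewrite author's own statement) =====
-- stated objective: faster
-- what changed: Replaced the scan over SECTIONS with an inner scan of labels by a precomputed label->(priority, section) reverse index and a single pass over labels tracking the minimum-priority hit.
import Mathlib
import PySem

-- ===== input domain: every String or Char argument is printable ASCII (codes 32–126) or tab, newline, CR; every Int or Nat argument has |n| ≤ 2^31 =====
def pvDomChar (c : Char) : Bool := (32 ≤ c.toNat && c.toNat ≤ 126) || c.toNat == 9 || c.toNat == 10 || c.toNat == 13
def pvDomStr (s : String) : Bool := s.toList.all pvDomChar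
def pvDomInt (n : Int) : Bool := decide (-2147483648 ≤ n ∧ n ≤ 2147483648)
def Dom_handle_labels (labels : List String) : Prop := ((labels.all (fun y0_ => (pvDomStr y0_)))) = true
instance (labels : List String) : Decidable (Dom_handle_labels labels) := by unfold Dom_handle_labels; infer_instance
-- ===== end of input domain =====

-- B replaces A's scan over SECTIONS (with an inner scan of labels) by a single pass over labels
-- resolved through a precomputed label→(priority, section) reverse index; objective: idiomatic/alternative.

def SECTIONS : List (String × List String) :=
  [ ("Major Changes", ["major"]),
    ("Protocol Changes", ["protocol change"]),
    ("Node Configuration Updates", ["toml", "configuration default change"]),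
    ("RPC Updates", ["rpc"]),
    ("IPC Updates", ["ipc"]),
    ("Websocket Updates", ["websockets"]),
    ("CLI Updates", ["cli"]),
    ("Deprecation/Removal", ["deprecation", "removal"]),
    ("Developer Wallet", ["qt wallet"]),
    ("Ledger & Database", ["database", "database structure"]),
    ("Developer/Debug Options", ["debug", "logging"]),
    ("Fixed Bugs", ["bug"]),
    ("Implemented Enhancements",
      ["enhancement", "functionality quality improvements", "performance", "quality improvements"]),
    ("Build, Test, Automation, Cleanup & Chores",
      ["build-error", "documentation", "non-functional change", "routine", "sanitizers",
       "static-analysis", "tool", "unit test", "universe"]),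
    ("Other", []) ]

-- ===== PORT A =====
-- inner loop: "for label in labels: if label in values: …"
def pvInnerA : List String → List String → Bool
  | [], _ => false
  | l :: rest, values => if values.contains l then true else pvInnerA rest values

-- "any(string in labels for string in ['breaking'])"
def pvAnyBreaking (labels : List String) : Bool := ["breaking"].any (fun s => labels.contains s)

-- outer loop: "for section, values in SECTIONS.items(): …"
def pvLoopA : List (String × List String) → List String → String × Bool
  | [], _ => ("Other", false)
  | (sec, values) :: rest, labels =>
    if pvInnerA labels values then (sec, pvAnyBreaking labels) else pvLoopA rest labels

def handle_labels (labels : List String) : String × Bool := pvLoopA SECTIONS labels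

-- ===== PORT B =====
-- dict comprehension: {label: (i, section) for i, (section, ls) in enumerate(SECTIONS.items()) for label in ls}
def LABEL_TO_SECTION : PySem.Dict String (Int × String) :=
  (PySem.List.enumerate SECTIONS).foldl
    (fun d p => p.2.2.foldl (fun d lab => d.insert lab (p.1, p.2.1)) d) PySem.Dict.empty

-- loop body: hit = LABEL_TO_SECTION.get(label); if hit is not None and (best is None or hit[0] < best[0]): best = hit
def pvStepB (best : Option (Int × String)) (label : String) : Option (Int × String) :=
  match LABEL_TO_SECTION.get? label with
  | some hit =>
    match best with
    | none => some hit
    | some b => if hit.1 < b.1 then some hit else best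
  | none => best

def handle_labels_alt (labels : List String) : String × Bool :=
  let best := labels.foldl pvStepB none
  match best with
  | none => ("Other", false)
  | some b => (b.2, labels.contains "breaking")

-- ===== PRECONDITION & SPEC =====
def Spec_handle_labels (labels : List String) (out : String × Bool) : Prop := out = handle_labels_alt labels
instance (labels : List String) (out : String × Bool) : Decidable (Spec_handle_labels labels out) := by unfold Spec_handle_labels; infer_instance

-- ===== CLAIM (what is proved, stated in full; the proofs are below) =====
def Claim_equal_handle_labels : Prop := ∀ (labels : List String), Dom_handle_labels labels → Spec_handle_labels labels (handle_labels labels)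

-- ===== LEMMAS AND PROOFS =====

-- flattened (label, (section index, section name)) pairs, indices starting at i
def pvFlat : List (String × List String) → Int → List (String × (Int × String))
  | [], _ => []
  | (s, vs) :: rest, i => vs.map (fun v => (v, (i, s))) ++ pvFlat rest (i + 1)

-- first section (from index i) whose label list contains l
def pvFidx (secs : List (String × List String)) (i : Int) (l : String) : Option (Int × String) :=
  Option.map (fun p => p.2) (List.find? (fun p => p.1 == l) (pvFlat secs i))

-- proof-side abstraction of pvStepB's merge
def pvMerge (best : Option (Int × String)) (o : Option (Int × String)) : Option (Int × String) :=
  match o with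
  | some hit =>
    match best with
    | none => some hit
    | some b => if hit.1 < b.1 then some hit else best
  | none => best

lemma lts_eval : LABEL_TO_SECTION = PySem.Dict.mk [("major", (0, "Major Changes")), ("protocol change", (1, "Protocol Changes")), ("toml", (2, "Node Configuration Updates")), ("configuration default change", (2, "Node Configuration Updates")), ("rpc", (3, "RPC Updates")), ("ipc", (4, "IPC Updates")), ("websockets", (5, "Websocket Updates")), ("cli", (6, "CLI Updates")), ("deprecation", (7, "Deprecation/Removal")), ("removal", (7, "Deprecation/Removal")), ("qt wallet", (8, "Developer Wallet")), ("database", (9, "Ledger & Database")), ("database structure", (9, "Ledger & Database")), ("debug", (10, "Developer/Debug Options")), ("logging", (10, "Developer/Debug Options")), ("bug", (11, "Fixed Bugs")), ("enhancement", (12, "Implemented Enhancements")), ("functionality quality improvements", (12, "Implemented Enhancements")), ("performance", (12, "Implemented Enhancements")), ("quality improvements", (12, "Implemented Enhancements")), ("build-error", (13, "Build, Test, Automation, Cleanup & Chores")), ("documentation", (13, "Build, Test, Automation, Cleanup & Chores")), ("non-functional change", (13, "Build, Test, Automation, Cleanup & Chores")), ("routine", (13, "Build, Test, Automation, Cleanup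 & Chores")), ("sanitizers", (13, "Build, Test, Automation, Cleanup & Chores")), ("static-analysis", (13, "Build, Test, Automation, Cleanup & Chores")), ("tool", (13, "Build, Test, Automation, Cleanup & Chores")), ("unit test", (13, "Build, Test, Automation, Cleanup & Chores")), ("universe", (13, "Build, Test, Automation, Cleanup & Chores"))] := by rfl

lemma classify_eq (l : String) : LABEL_TO_SECTION.get? l = pvFidx SECTIONS 0 l := by
  rw [lts_eval]
  simp only [PySem.Dict.get?, pvFidx]
  rfl

lemma stepB_eq (best : Option (Int × String)) (l : String) :
    pvStepB best l = pvMerge best (pvFidx SECTIONS 0 l) := by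
  have h : pvStepB best l = pvMerge best (LABEL_TO_SECTION.get? l) := rfl
  rw [h, classify_eq]

lemma innerA_iff (labels vs : List String) :
    pvInnerA labels vs = true ↔ ∃ l ∈ labels, l ∈ vs := by
  induction labels with
  | nil => simp [pvInnerA]
  | cons x xs ih =>
    simp only [pvInnerA]
    by_cases h : vs.contains x = true
    · simp only [h, if_true, true_iff]
      exact ⟨x, List.mem_cons_self, List.contains_iff_mem.mp h⟩
    · rw [if_neg h, ih]
      constructor
      · rintro ⟨l, hl, hm⟩; exact ⟨l, List.mem_cons_of_mem _ hl, hm⟩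
      · rintro ⟨l, hl, hm⟩
        rcases List.mem_cons.mp hl with rfl | hl'
        · exact absurd (List.contains_iff_mem.mpr hm) h
        · exact ⟨l, hl', hm⟩

lemma flat_key_ge : ∀ (secs : List (String × List String)) (i : Int)
    (p : String × (Int × String)), p ∈ pvFlat secs i → i ≤ p.2.1 := by
  intro secs
  induction secs with
  | nil => intro i p hp; simp [pvFlat] at hp
  | cons q rest ih =>
    obtain ⟨s, vs⟩ := q
    intro i p hp
    rcases List.mem_append.mp hp with hp | hp
    · obtain ⟨v, _, rfl⟩ := List.mem_map.mp hp; simp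
    · have := ih (i + 1) p hp; omega

lemma fidx_ge {secs : List (String × List String)} {i : Int} {l : String} {b : Int × String}
    (h : pvFidx secs i l = some b) : i ≤ b.1 := by
  unfold pvFidx at h
  cases hf : List.find? (fun p => p.1 == l) (pvFlat secs i) with
  | none => rw [hf] at h; cases h
  | some p =>
    rw [hf] at h
    cases h
    exact flat_key_ge secs i p (List.mem_of_find?_eq_some hf)

lemma flat_head (i : Int) (s l : String) (vs : List String) (tail : List (String × (Int × String))) :
    Option.map (fun p => p.2) (List.find? (fun p => p.1 == l) (vs.map (fun v => (v, (i, s))) ++ tail)) =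
      if l ∈ vs then some (i, s)
      else Option.map (fun p => p.2) (List.find? (fun p => p.1 == l) tail) := by
  induction vs with
  | nil => simp
  | cons v vs' ih =>
    simp only [List.map_cons, List.cons_append, List.find?_cons]
    by_cases hv : v = l
    · subst hv; simp
    · have hbeq : (v == l) = false := beq_eq_false_iff_ne.mpr hv
      have hmem : (l ∈ v :: vs') = (l ∈ vs') := by
        simp only [List.mem_cons, eq_iff_iff]
        constructor
        · rintro (rfl | h)
          · exact absurd rfl hv
          · exact h
        · exact Or.inr
      rw [hbeq]
      simp only [ih, hmem]

lemma fidx_cons (s : String) (vs : List String) (rest : List (String × List String))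
    (i : Int) (l : String) :
    pvFidx ((s, vs) :: rest) i l = if l ∈ vs then some (i, s) else pvFidx rest (i + 1) l := by
  simp only [pvFidx, pvFlat]
  exact flat_head i s l vs (pvFlat rest (i + 1))

lemma fidx_cons_mem {s : String} {vs : List String} (rest : List (String × List String))
    (i : Int) {l : String} (hl : l ∈ vs) : pvFidx ((s, vs) :: rest) i l = some (i, s) := by
  rw [fidx_cons, if_pos hl]

lemma fidx_cons_not_mem {s : String} {vs : List String} (rest : List (String × List String))
    (i : Int) {l : String} (hl : l ∉ vs) : pvFidx ((s, vs) :: rest) i l = pvFidx rest (i + 1) l := by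
  rw [fidx_cons, if_neg hl]

-- the fold of pvMerge returns some (i, s) when one element hits (i, s) and all others have key > i (or are (i, s)/none)
lemma foldl_merge_hit (i : Int) (s : String) (f : String → Option (Int × String)) :
    ∀ (labels : List String) (acc : Option (Int × String)),
    (∀ l ∈ labels, f l = none ∨ f l = some (i, s) ∨ ∃ b, f l = some b ∧ i < b.1) →
    (acc = some (i, s) ∨ ((acc = none ∨ ∃ b, acc = some b ∧ i < b.1) ∧ ∃ l ∈ labels, f l = some (i, s))) →
    labels.foldl (fun a l => pvMerge a (f l)) acc = some (i, s) := by
  intro labels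
  induction labels with
  | nil =>
    intro acc _ hacc
    rcases hacc with h | ⟨_, _, h, _⟩
    · simpa using h
    · simp at h
  | cons x xs ih =>
    intro acc hall hacc
    simp only [List.foldl_cons]
    apply ih
    · intro l hl; exact hall l (List.mem_cons_of_mem _ hl)
    · -- analyze pvMerge acc (f x)
      rcases hall x (List.mem_cons_self) with hx | hx | ⟨b, hb, hbi⟩
      · -- f x = none : merge leaves acc
        rcases hacc with h | ⟨ha, l, hl, hfl⟩
        · left; simp [pvMerge, hx, h]
        · right
          refine ⟨?_, ?_⟩
          · rcases ha with h | ⟨b, hb, hbi⟩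
            · left; simp [pvMerge, hx, h]
            · right; exact ⟨b, by simp [pvMerge, hx, hb], hbi⟩
          · rcases List.mem_cons.mp hl with rfl | hl'
            · rw [hfl] at hx; cases hx
            · exact ⟨l, hl', hfl⟩
      · -- f x = some (i, s)
        left
        rcases hacc with h | ⟨ha, _⟩
        · simp [pvMerge, hx, h]
        · rcases ha with h | ⟨b, hb, hbi⟩
          · simp [pvMerge, hx, h]
          · simp [pvMerge, hx, hb, hbi]
      · -- f x = some b with i < b.1
        rcases hacc with h | ⟨ha, l, hl, hfl⟩
        · left; simp [pvMerge, hb, h, not_lt.mpr (le_of_lt hbi)]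
        · right
          refine ⟨?_, ?_⟩
          · right
            rcases ha with h | ⟨c, hc, hci⟩
            · exact ⟨b, by simp [pvMerge, hb, h], hbi⟩
            · by_cases hlt : b.1 < c.1
              · exact ⟨b, by simp [pvMerge, hb, hc, hlt], hbi⟩
              · exact ⟨c, by simp [pvMerge, hb, hc, hlt], hci⟩
          · rcases List.mem_cons.mp hl with rfl | hl'
            · rw [hfl] at hb; cases hb; omega
            · exact ⟨l, hl', hfl⟩

lemma foldl_merge_none (f : String → Option (Int × String)) :
    ∀ (labels : List String) (acc : Option (Int × String)),
    (∀ l ∈ labels, f l = none) →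
    labels.foldl (fun a l => pvMerge a (f l)) acc = acc := by
  intro labels
  induction labels with
  | nil => intro acc _; rfl
  | cons x xs ih =>
    intro acc hall
    simp only [List.foldl_cons]
    rw [show pvMerge acc (f x) = acc by simp [pvMerge, hall x List.mem_cons_self]]
    exact ih acc (fun l hl => hall l (List.mem_cons_of_mem _ hl))

lemma key_lemma : ∀ (secs : List (String × List String)) (i : Int) (labels : List String),
    pvLoopA secs labels =
      match labels.foldl (fun a l => pvMerge a (pvFidx secs i l)) none with
      | none => ("Other", false)
      | some b => (b.2, pvAnyBreaking labels) := by
  intro secs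
  induction secs with
  | nil =>
    intro i labels
    have h : ∀ l ∈ labels, pvFidx ([] : List (String × List String)) i l = none := fun _ _ => rfl
    rw [foldl_merge_none _ labels none h]
    rfl
  | cons p rest ih =>
    obtain ⟨s, vs⟩ := p
    intro i labels
    by_cases h : pvInnerA labels vs = true
    · obtain ⟨l0, hl0, hmem⟩ := (innerA_iff labels vs).mp h
      have hfold : labels.foldl (fun a l => pvMerge a (pvFidx ((s, vs) :: rest) i l)) none = some (i, s) := by
        apply foldl_merge_hit
        · intro l _
          by_cases hm : l ∈ vs
          · right; left; exact fidx_cons_mem rest i hm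
          · rw [fidx_cons_not_mem rest i hm]
            cases hf : pvFidx rest (i + 1) l with
            | none => left; rfl
            | some b =>
              right; right
              exact ⟨b, rfl, by have := fidx_ge hf; omega⟩
        · right
          exact ⟨Or.inl rfl, l0, hl0, fidx_cons_mem rest i hmem⟩
      simp only [pvLoopA, h, if_true, hfold]
    · have hno : ∀ l ∈ labels, l ∉ vs := by
        intro l hl hmem
        exact h ((innerA_iff labels vs).mpr ⟨l, hl, hmem⟩)
      have hcongr : labels.foldl (fun a l => pvMerge a (pvFidx ((s, vs) :: rest) i l)) none =
          labels.foldl (fun a l => pvMerge a (pvFidx rest (i + 1) l)) none := by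
        apply PySem.List.foldl_congr_mem
        intro a l hl
        rw [fidx_cons_not_mem rest i (hno l hl)]
      simp only [pvLoopA, h, if_false, hcongr, Bool.false_eq_true]
      exact ih (i + 1) labels

-- ===== VERDICT (by name: the statement is the Claim_ definition above) =====
theorem handle_labels_spec : Claim_equal_handle_labels := by
  intro labels _
  unfold Spec_handle_labels handle_labels handle_labels_alt
  have hstep : labels.foldl pvStepB none =
      labels.foldl (fun a l => pvMerge a (pvFidx SECTIONS 0 l)) none := by
    apply PySem.List.foldl_congr_mem
    intro a l _
    exact stepB_eq a l
  rw [key_lemma SECTIONS 0 labels]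
  simp only [hstep]
  cases labels.foldl (fun a l => pvMerge a (pvFidx SECTIONS 0 l)) none with
  | none => rfl
  | some b => simp [pvAnyBreaking]
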